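-- pv_equiv track=rewrite | github.com/mechauk418/BOJ | 프로그래머스/lv2/131704. 택배상자/택배상자.py | solution
-- ===== SOURCE A (Python) =====
-- from collections import deque
--
-- def solution(order):
--     answer = 0
--     n = len(order)
--     main = [ i for i in range(1,n+1)]
--     main = deque(main)
--     order = deque(order)
--     sub = []
--
--
--     for i in range(n):
--         if not order:
--             break
--
--         if main[0] != order[0]:
--             now = main.popleft()
--             sub.append(now)
--
--         else:
--             main.popleft()
--             order.popleft()
--             answer +=1
--             if sub:
--                 while sub[-1]==order[0]:
--                     sub.pop()
--                     order.popleft()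
--                     answer +=1
--                     if not sub:
--                         break
--
--     return answer
-- ===== SOURCE B (Python) =====
-- def solution(order):
--     answer = 0
--     n = len(order)
--     i = 1          # next box on the belt
--     stack = []     # the side stack
--     for box in order:
--         while (not stack or stack[-1] != box) and i <= n:
--             stack.append(i)
--             i += 1
--         if stack and stack[-1] == box:
--             stack.pop()
--             answer += 1
--         else:
--             break
--     return answer
-- ===== Notes on version B (the rewrite author's own statement) =====
-- stated objective: simpler
-- what changed: Replaced A's fixed range(n) outer loop over a materialized deque of belt boxes (one belt move per iteration, plus a separate inner cascade popping the side stack) by the standard belt/stack greedy: iterate over the order list itself, keep the belt as a single integer counter, and one inner while per order element pushes belt boxes until the stack top matches; then pop or break.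
import Mathlib
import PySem

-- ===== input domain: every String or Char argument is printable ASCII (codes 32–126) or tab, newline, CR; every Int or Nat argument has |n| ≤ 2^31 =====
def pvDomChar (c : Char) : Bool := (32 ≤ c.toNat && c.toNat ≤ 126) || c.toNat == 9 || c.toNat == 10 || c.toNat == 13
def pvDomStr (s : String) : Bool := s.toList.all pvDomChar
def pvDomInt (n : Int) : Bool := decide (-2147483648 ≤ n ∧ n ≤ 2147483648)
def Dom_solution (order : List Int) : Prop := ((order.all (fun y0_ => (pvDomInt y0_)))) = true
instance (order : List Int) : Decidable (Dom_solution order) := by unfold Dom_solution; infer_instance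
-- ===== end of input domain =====

-- B replaces A's per-belt-box outer loop (deque of 1..n + separate cascade) by the standard
-- per-order-element greedy with the belt kept as one integer counter; objective: simpler.

-- ===== PORT A =====
-- the inner `while sub[-1]==order[0]` cascade; `sub` is kept top-at-head (Python appends/pops
-- at the end of the list — same stack, reversed storage).  The case order = [] with sub ≠ []
-- (where Python's order[0] would raise) is unreachable from solution's initial state
-- (each matched order element was paired with a distinct belt box).
def solCascade (answer : Int) (order sub : List Int) : Int × List Int × List Int :=
  match sub, order with
  | t :: rest, o :: ord =>
      if t = o then solCascade (answer + 1) ord rest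
      else (answer, o :: ord, t :: rest)
  | _, _ => (answer, order, sub)

-- the `for i in range(n)` loop; fuel = iterations remaining.  main = [] with order ≠ []
-- (where Python's main[0] would raise) is unreachable: |main| = fuel on every reachable state.
def solLoop : Nat → Int → List Int → List Int → List Int → Int
  | 0, answer, _, _, _ => answer
  | k + 1, answer, main, order, sub =>
    match order with
    | [] => answer                               -- if not order: break
    | o :: ord =>
      match main with
      | [] => answer                             -- unreachable (Python IndexError)
      | m :: ms =>
        if m ≠ o then solLoop k answer ms (o :: ord) (m :: sub)
        else
          match solCascade (answer + 1) ord sub with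
          | (a', ord', sub') => solLoop k a' ms ord' sub'

def solution (order : List Int) : Int :=
  let n := order.length
  solLoop n 0 (PySem.List.pyRange 1 ((n : Int) + 1) 1) order []

-- ===== PORT B =====
-- inner while: push belt boxes i, i+1, … until the stack top is `box` or the belt runs out
def altPush (box n i : Int) (stack : List Int) : Int × List Int :=
  if _h : i ≤ n then
    match stack with
    | t :: _ => if t = box then (i, stack) else altPush box n (i + 1) (i :: stack)
    | [] => altPush box n (i + 1) (i :: stack)
  else (i, stack)
termination_by (n + 1 - i).toNat
decreasing_by all_goals omega

def altLoop (n : Int) : List Int → Int → List Int → Int → Int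
  | [], _, _, answer => answer
  | box :: rest, i, stack, answer =>
    match altPush box n i stack with
    | (i', stack') =>
      match stack' with
      | t :: st => if t = box then altLoop n rest i' st (answer + 1) else answer
      | [] => answer

def solution_alt (order : List Int) : Int :=
  let n : Int := order.length
  altLoop n order 1 [] 0

-- ===== PRECONDITION & SPEC =====
def Spec_solution (order : List Int) (out : Int) : Prop := out = solution_alt order
instance (order : List Int) (out : Int) : Decidable (Spec_solution order out) := by unfold Spec_solution; infer_instance

-- ===== CLAIM (what is proved, stated in full; the proofs are below) =====
def Claim_equal_solution : Prop := ∀ (order : List Int), Dom_solution order → Spec_solution order (solution order)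

-- ===== LEMMAS AND PROOFS =====

-- B with the belt materialized as a list (proof intermediate between the two ports)
def pushL (box : Int) : List Int → List Int → List Int × List Int
  | [], stack => ([], stack)
  | m :: ms, stack =>
    match stack with
    | t :: _ => if t = box then (m :: ms, stack) else pushL box ms (m :: stack)
    | [] => pushL box ms (m :: stack)

def bLoopL : List Int → List Int → List Int → Int → Int
  | [], _, _, answer => answer
  | box :: rest, main, stack, answer =>
    match pushL box main stack with
    | (main', stack') =>
      match stack' with
      | t :: st => if t = box then bLoopL rest main' st (answer + 1) else answer
      | [] => answer

-- invariant: the stack top never equals the next order element (A re-establishes it each step)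
def SInv : List Int → List Int → Prop
  | o :: _, t :: _ => t ≠ o
  | _, _ => True

theorem pushL_top_eq (box : Int) (belt st : List Int) :
    pushL box belt (box :: st) = (belt, box :: st) := by
  cases belt with
  | nil => rfl
  | cons m ms => simp [pushL]

theorem cascade_sim (sub : List Int) : ∀ (order : List Int) (answer : Int) (ms : List Int),
    bLoopL order ms sub answer =
      bLoopL (solCascade answer order sub).2.1 ms (solCascade answer order sub).2.2
        (solCascade answer order sub).1 ∧
    SInv (solCascade answer order sub).2.1 (solCascade answer order sub).2.2 := by
  induction sub with
  | nil =>
    intro order answer ms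
    cases order <;> exact ⟨rfl, trivial⟩
  | cons t rest ih =>
    intro order answer ms
    cases order with
    | nil => exact ⟨rfl, trivial⟩
    | cons o ord =>
      by_cases h : t = o
      · subst h
        have hstep : bLoopL (t :: ord) ms (t :: rest) answer = bLoopL ord ms rest (answer + 1) := by
          simp [bLoopL, pushL_top_eq]
        have hcas : solCascade answer (t :: ord) (t :: rest) = solCascade (answer + 1) ord rest := by
          simp [solCascade]
        rw [hstep, hcas]
        exact ih ord (answer + 1) ms
      · have hcas : solCascade answer (o :: ord) (t :: rest) = (answer, o :: ord, t :: rest) := by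
          simp [solCascade, h]
        rw [hcas]
        exact ⟨rfl, h⟩

theorem pushL_skip (box m : Int) (ms stack : List Int)
    (h : ∀ t st, stack = t :: st → t ≠ box) :
    pushL box (m :: ms) stack = pushL box ms (m :: stack) := by
  cases stack with
  | nil => rfl
  | cons t st => simp [pushL, h t st rfl]

theorem main_sim (main : List Int) : ∀ (order sub : List Int) (answer : Int),
    SInv order sub → solLoop main.length answer main order sub = bLoopL order main sub answer := by
  induction main with
  | nil =>
    intro order sub answer hinv
    cases order with
    | nil => rfl
    | cons o ord =>
      cases sub with
      | nil => rfl
      | cons t st =>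
        have ht : t ≠ o := hinv
        simp [solLoop, bLoopL, pushL, ht]
  | cons m ms ih =>
    intro order sub answer hinv
    cases order with
    | nil => rfl
    | cons o ord =>
      have hstack : ∀ t st, sub = t :: st → t ≠ o := by
        intro t st hs; subst hs; exact hinv
      by_cases hm : m = o
      · subst hm
        have hpush : pushL m (m :: ms) sub = (ms, m :: sub) := by
          cases sub with
          | nil => simpa [pushL] using pushL_top_eq m ms []
          | cons t st =>
            have ht : t ≠ m := hstack t st rfl
            simpa [pushL, ht] using pushL_top_eq m ms (t :: st)
        have hb : bLoopL (m :: ord) (m :: ms) sub answer = bLoopL ord ms sub (answer + 1) := by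
          simp [bLoopL, hpush]
        obtain ⟨hc1, hc2⟩ := cascade_sim sub ord (answer + 1) ms
        have hA : solLoop (m :: ms).length answer (m :: ms) (m :: ord) sub =
            solLoop ms.length (solCascade (answer + 1) ord sub).1 ms
              (solCascade (answer + 1) ord sub).2.1 (solCascade (answer + 1) ord sub).2.2 := by
          simp [solLoop]
        rw [hA, hb, hc1, ih _ _ _ hc2]
      · have hA : solLoop (m :: ms).length answer (m :: ms) (o :: ord) sub =
            solLoop ms.length answer ms (o :: ord) (m :: sub) := by
          simp [solLoop, hm]
        have hB : bLoopL (o :: ord) (m :: ms) sub answer = bLoopL (o :: ord) ms (m :: sub) answer := by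
          have := pushL_skip o m ms sub (fun t st hs => by subst hs; exact hstack t st rfl)
          simp [bLoopL, this]
        rw [hA, hB, ih (o :: ord) (m :: sub) answer hm]

theorem altPush_stop (box n i : Int) (stack : List Int) (h : ¬ i ≤ n) :
    altPush box n i stack = (i, stack) := by
  rw [altPush.eq_def]; simp [h]

theorem altPush_top (box n i : Int) (st : List Int) (h : i ≤ n) :
    altPush box n i (box :: st) = (i, box :: st) := by
  rw [altPush.eq_def]; simp [h]

theorem altPush_push_nil (box n i : Int) (h : i ≤ n) :
    altPush box n i [] = altPush box n (i + 1) [i] := by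
  conv_lhs => rw [altPush.eq_def]
  simp [h]

theorem altPush_push (box n i t : Int) (st : List Int) (h : i ≤ n) (ht : t ≠ box) :
    altPush box n i (t :: st) = altPush box n (i + 1) (i :: t :: st) := by
  conv_lhs => rw [altPush.eq_def]
  simp [h, ht]

theorem altPush_bridge (box n : Int) : ∀ (i : Int) (stack : List Int),
    pushL box (PySem.List.pyRange i (n + 1) 1) stack =
      (PySem.List.pyRange (altPush box n i stack).1 (n + 1) 1, (altPush box n i stack).2) := by
  intro i stack
  by_cases h : i ≤ n
  · rw [PySem.List.pyRange_one_cons (by omega : i < n + 1)]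
    cases stack with
    | nil =>
      rw [altPush_push_nil box n i h]
      simpa [pushL] using altPush_bridge box n (i + 1) [i]
    | cons t st =>
      by_cases ht : t = box
      · rw [ht, pushL_top_eq, altPush_top box n i st h,
          PySem.List.pyRange_one_cons (by omega : i < n + 1)]
      · rw [altPush_push box n i t st h ht]
        simpa [pushL, ht] using altPush_bridge box n (i + 1) (i :: t :: st)
  · rw [PySem.List.pyRange_one_eq_nil (by omega : n + 1 ≤ i), altPush_stop box n i stack h,
      PySem.List.pyRange_one_eq_nil (by omega : n + 1 ≤ i)]
    rfl
termination_by i => (n + 1 - i).toNat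
decreasing_by all_goals omega

theorem altLoop_bridge (n : Int) (order : List Int) : ∀ (i : Int) (stack : List Int) (answer : Int),
    altLoop n order i stack answer = bLoopL order (PySem.List.pyRange i (n + 1) 1) stack answer := by
  induction order with
  | nil => intro i stack answer; rfl
  | cons box rest ih =>
    intro i stack answer
    have hb := altPush_bridge box n i stack
    rcases hp : altPush box n i stack with ⟨i', stack'⟩
    rw [hp] at hb
    simp only [altLoop, bLoopL, hp, hb]
    cases stack' with
    | nil => rfl
    | cons t st => by_cases ht : t = box <;> simp [ht, ih]

-- ===== VERDICT (by name: the statement is the Claim_ definition above) =====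
theorem solution_spec : Claim_equal_solution := by
  unfold Claim_equal_solution
  intro order _
  unfold Spec_solution solution solution_alt
  have hlen : (PySem.List.pyRange 1 ((order.length : Int) + 1) 1).length = order.length := by
    rw [PySem.List.length_pyRange_one]; omega
  calc solLoop order.length 0 (PySem.List.pyRange 1 ((order.length : Int) + 1) 1) order []
      = solLoop (PySem.List.pyRange 1 ((order.length : Int) + 1) 1).length 0
          (PySem.List.pyRange 1 ((order.length : Int) + 1) 1) order [] := by rw [hlen]
    _ = bLoopL order (PySem.List.pyRange 1 ((order.length : Int) + 1) 1) [] 0 := by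
        apply main_sim
        cases order <;> trivial
    _ = altLoop (order.length : Int) order 1 [] 0 := (altLoop_bridge _ order 1 [] 0).symm
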